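-- pv_equiv track=rewrite | github.com/andxeg/evolved_sprint_hackathon_2025 | backend/dual_targets/get_input_boltzgen.py | interleave_design_ranges_in_sequence
-- ===== SOURCE A (Python) =====
-- from typing import List, Dict, Set
--
-- def interleave_design_ranges_in_sequence(sequence: str, design_residues: Set[int]) -> str:
--     """Interleave design ranges with fixed amino acids in sequence.
--
--     Args:
--         sequence: Full amino acid sequence (1-indexed positions)
--         design_residues: Set of residue positions (1-indexed) that should be designed
--
--     Returns:
--         String with design ranges interspersed with fixed amino acids
--         Example: "AB3..5FG8..10KLMNOP" where 3..5 and 8..10 are design regions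
--     """
--     if not design_residues:
--         return sequence
--
--     # Convert to 0-indexed for sequence access
--     design_set = {pos - 1 for pos in design_residues if 1 <= pos <= len(sequence)}
--
--     if not design_set:
--         return sequence
--
--     result_parts = []
--     i = 0
--     seq_len = len(sequence)
--
--     while i < seq_len:
--         if i in design_set:
--             # Start of a design region - find the end
--             start = i
--             while i < seq_len and i in design_set:
--                 i += 1
--             end = i - 1
--
--             # Format the design range (convert back to 1-indexed)
--             if start == end:
--                 result_parts.append(str(start + 1))
--             else:
--                 result_parts.append(f"{start + 1}..{end + 1}")
--         else:
--             # Fixed region - collect consecutive fixed amino acids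
--             fixed_start = i
--             while i < seq_len and i not in design_set:
--                 i += 1
--             fixed_end = i
--             result_parts.append(sequence[fixed_start:fixed_end])
--
--     return "".join(result_parts)
-- ===== SOURCE B (Python) =====
-- def interleave_design_ranges_in_sequence(sequence: str, design_residues) -> str:
--     """Interleave design ranges with fixed amino acids in sequence.
--
--     Computes the maximal consecutive design runs up front from the sorted
--     filtered positions, then fills the gaps with slices in one pass.
--     """
--     # 0-indexed design positions, distinct, ascending
--     positions = sorted({pos - 1 for pos in design_residues if 1 <= pos <= len(sequence)})
--
--     # group maximal consecutive runs as (start, end) pairs, 0-indexed inclusive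
--     runs = []
--     if positions:
--         s = e = positions[0]
--         for p in positions[1:]:
--             if p == e + 1:
--                 e = p
--             else:
--                 runs.append((s, e))
--                 s = e = p
--         runs.append((s, e))
--
--     # gap-filling pass
--     parts = []
--     cursor = 0
--     for (s, e) in runs:
--         parts.append(sequence[cursor:s])
--         parts.append(str(s + 1) if s == e else f"{s + 1}..{e + 1}")
--         cursor = e + 1
--     parts.append(sequence[cursor:])
--     return "".join(parts)
-- ===== Notes on version B (the rewrite author's own statement) =====
-- stated objective: alternative
-- what changed: Instead of A's index-by-index walk over the sequence with inner membership-testing while-loops, B first computes the maximal consecutive design runs from the sorted filtered positions and then emits slices and range labels in a single gap-filling pass over the runs with a cursor.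
import Mathlib
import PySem

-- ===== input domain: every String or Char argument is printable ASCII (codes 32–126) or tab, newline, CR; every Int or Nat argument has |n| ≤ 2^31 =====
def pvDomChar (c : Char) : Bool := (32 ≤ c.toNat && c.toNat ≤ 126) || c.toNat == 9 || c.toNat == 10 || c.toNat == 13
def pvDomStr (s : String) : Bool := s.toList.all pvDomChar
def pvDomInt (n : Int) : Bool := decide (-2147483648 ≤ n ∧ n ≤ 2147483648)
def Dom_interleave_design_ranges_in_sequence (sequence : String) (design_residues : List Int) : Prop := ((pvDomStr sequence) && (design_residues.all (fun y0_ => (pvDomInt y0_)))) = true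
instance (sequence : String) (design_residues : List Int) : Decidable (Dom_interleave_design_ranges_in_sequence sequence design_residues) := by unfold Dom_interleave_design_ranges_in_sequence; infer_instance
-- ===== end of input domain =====

-- B computes the maximal consecutive design runs up front from the sorted filtered
-- positions and then fills the gaps in one pass, instead of A's per-index scan of the
-- sequence with inner membership-test while-loops (objective: alternative decomposition).

-- ===== PORT A =====
-- inner while-loop 'while i < seq_len and i in design_set: i += 1'
def scanMem (n : Nat) (mem : Nat → Bool) (i : Nat) : Nat :=
  if h : i < n ∧ mem i = true then scanMem n mem (i + 1) else i
  termination_by n - i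
  decreasing_by omega

-- inner while-loop 'while i < seq_len and i not in design_set: i += 1'
def scanFix (n : Nat) (mem : Nat → Bool) (i : Nat) : Nat :=
  if h : i < n ∧ mem i = false then scanFix n mem (i + 1) else i
  termination_by n - i
  decreasing_by omega

-- the two lemmas below are cited by walkA's decreasing_by (termination of the outer while)
theorem le_scanMem (n : Nat) (mem : Nat → Bool) (i : Nat) : i ≤ scanMem n mem i := by
  fun_induction scanMem <;> omega

theorem le_scanFix (n : Nat) (mem : Nat → Bool) (i : Nat) : i ≤ scanFix n mem i := by
  fun_induction scanFix <;> omega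

theorem scanMem_succ_le (n : Nat) (mem : Nat → Bool) (i : Nat) (h1 : i < n)
    (h2 : mem i = true) : i + 1 ≤ scanMem n mem i := by
  rw [scanMem, dif_pos ⟨h1, h2⟩]; exact le_scanMem n mem (i + 1)

theorem scanFix_succ_le (n : Nat) (mem : Nat → Bool) (i : Nat) (h1 : i < n)
    (h2 : mem i = false) : i + 1 ≤ scanFix n mem i := by
  rw [scanFix, dif_pos ⟨h1, h2⟩]; exact le_scanFix n mem (i + 1)

-- the outer 'while i < seq_len' loop of A, building result_parts
def walkA (cs : List Char) (mem : Nat → Bool) (i : Nat) (parts : List String) : List String :=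
  if hl : i < cs.length then
    if hm : mem i = true then
      -- design region: start = i, inner while advances i, end = i - 1
      let j := scanMem cs.length mem i
      let endI : Int := (j : Int) - 1
      let part := if (i : Int) = endI then PySem.Int.toStr ((i : Int) + 1)
        else PySem.Int.toStr ((i : Int) + 1) ++ ".." ++ PySem.Int.toStr (endI + 1)
      walkA cs mem j (parts ++ [part])
    else
      -- fixed region: collect sequence[fixed_start:fixed_end]
      let j := scanFix cs.length mem i
      walkA cs mem j (parts ++ [String.ofList (PySem.List.slice cs (some (i : Int)) (some (j : Int)))])
  else parts
  termination_by cs.length - i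
  decreasing_by
    · have := scanMem_succ_le cs.length mem i hl hm; omega
    · have := scanFix_succ_le cs.length mem i hl (by simpa using hm); omega

def interleave_design_ranges_in_sequence (sequence : String) (design_residues : List Int) : String :=
  if design_residues = [] then sequence
  else
    let cs := sequence.toList
    -- design_set = {pos - 1 for pos in design_residues if 1 <= pos <= len(sequence)}
    let design_set : PySem.Set Int :=
      PySem.Set.ofList ((design_residues.filter
        (fun pos => decide (1 ≤ pos ∧ pos ≤ (cs.length : Int)))).map (fun pos => pos - 1))
    if design_set = [] then sequence
    else
      PySem.Str.join "" (walkA cs (fun i => PySem.Set.contains design_set (i : Int)) 0 [])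

-- ===== PORT B =====
def interleave_design_ranges_in_sequence_alt (sequence : String) (design_residues : List Int) : String :=
  let cs := sequence.toList
  -- positions = sorted({pos - 1 for pos in design_residues if 1 <= pos <= len(sequence)})
  let positions := PySem.List.sorted
    (PySem.Set.ofList ((design_residues.filter
      (fun pos => decide (1 ≤ pos ∧ pos ≤ (cs.length : Int)))).map (fun pos => pos - 1)))
    (fun x => x) false
  -- group maximal consecutive runs as (start, end) pairs
  let runs : List (Int × Int) :=
    match positions with
    | [] => []
    | p :: rest =>
        let st := rest.foldl (fun (st : List (Int × Int) × Int × Int) q =>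
          if q = st.2.2 + 1 then (st.1, st.2.1, q)
          else (st.1 ++ [(st.2.1, st.2.2)], q, q)) ([], p, p)
        st.1 ++ [(st.2.1, st.2.2)]
  -- gap-filling pass with a cursor
  let st := runs.foldl (fun (st : List String × Int) r =>
      (st.1 ++ [String.ofList (PySem.List.slice cs (some st.2) (some r.1)),
        if r.1 = r.2 then PySem.Int.toStr (r.1 + 1)
        else PySem.Int.toStr (r.1 + 1) ++ ".." ++ PySem.Int.toStr (r.2 + 1)],
       r.2 + 1)) ([], 0)
  PySem.Str.join "" (st.1 ++ [String.ofList (PySem.List.slice cs (some st.2) none)])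

-- ===== PRECONDITION & SPEC =====
def Spec_interleave_design_ranges_in_sequence (sequence : String) (design_residues : List Int) (out : String) : Prop := out = interleave_design_ranges_in_sequence_alt sequence design_residues
instance (sequence : String) (design_residues : List Int) (out : String) : Decidable (Spec_interleave_design_ranges_in_sequence sequence design_residues out) := by unfold Spec_interleave_design_ranges_in_sequence; infer_instance

-- ===== CLAIM (what is proved, stated in full; the proofs are below) =====
def Claim_equal_interleave_design_ranges_in_sequence : Prop := ∀ (sequence : String) (design_residues : List Int), Dom_interleave_design_ranges_in_sequence sequence design_residues → Spec_interleave_design_ranges_in_sequence sequence design_residues (interleave_design_ranges_in_sequence sequence design_residues)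

-- ===== LEMMAS AND PROOFS =====

-- recursion view of B's run-grouping loop
def groupAux (s e : Int) : List Int → List (Int × Int)
  | [] => [(s, e)]
  | p :: rest => if p = e + 1 then groupAux s p rest else (s, e) :: groupAux p p rest

def groupRuns : List Int → List (Int × Int)
  | [] => []
  | p :: rest => groupAux p p rest

-- recursion view of B's gap-filling loop
def fillParts (cs : List Char) (c : Int) : List (Int × Int) → List String
  | [] => [String.ofList (PySem.List.slice cs (some c) none)]
  | (s, e) :: rest =>
      String.ofList (PySem.List.slice cs (some c) (some s)) ::
      (if s = e then PySem.Int.toStr (s + 1)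
       else PySem.Int.toStr (s + 1) ++ ".." ++ PySem.Int.toStr (e + 1)) ::
      fillParts cs (e + 1) rest

theorem groupFold_eq (rest : List Int) : ∀ (runs0 : List (Int × Int)) (s e : Int),
    (rest.foldl (fun (st : List (Int × Int) × Int × Int) q =>
        if q = st.2.2 + 1 then (st.1, st.2.1, q)
        else (st.1 ++ [(st.2.1, st.2.2)], q, q)) (runs0, s, e)).1
      ++ [((rest.foldl (fun (st : List (Int × Int) × Int × Int) q =>
        if q = st.2.2 + 1 then (st.1, st.2.1, q)
        else (st.1 ++ [(st.2.1, st.2.2)], q, q)) (runs0, s, e)).2.1,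
          (rest.foldl (fun (st : List (Int × Int) × Int × Int) q =>
        if q = st.2.2 + 1 then (st.1, st.2.1, q)
        else (st.1 ++ [(st.2.1, st.2.2)], q, q)) (runs0, s, e)).2.2)]
      = runs0 ++ groupAux s e rest := by
  induction rest with
  | nil => intro runs0 s e; simp [groupAux]
  | cons p rest ih =>
    intro runs0 s e
    simp only [List.foldl_cons, groupAux]
    by_cases hp : p = e + 1
    · simpa [hp] using ih runs0 s p
    · simpa [hp] using ih (runs0 ++ [(s, e)]) p p

theorem fillFold_eq (cs : List Char) (runs : List (Int × Int)) : ∀ (parts0 : List String) (c : Int),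
    (runs.foldl (fun (st : List String × Int) r =>
        (st.1 ++ [String.ofList (PySem.List.slice cs (some st.2) (some r.1)),
          if r.1 = r.2 then PySem.Int.toStr (r.1 + 1)
          else PySem.Int.toStr (r.1 + 1) ++ ".." ++ PySem.Int.toStr (r.2 + 1)],
         r.2 + 1)) (parts0, c)).1
      ++ [String.ofList (PySem.List.slice cs
            (some ((runs.foldl (fun (st : List String × Int) r =>
        (st.1 ++ [String.ofList (PySem.List.slice cs (some st.2) (some r.1)),
          if r.1 = r.2 then PySem.Int.toStr (r.1 + 1)
          else PySem.Int.toStr (r.1 + 1) ++ ".." ++ PySem.Int.toStr (r.2 + 1)],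
         r.2 + 1)) (parts0, c)).2)) none)]
      = parts0 ++ fillParts cs c runs := by
  induction runs with
  | nil => intro parts0 c; simp [fillParts]
  | cons r rest ih =>
    intro parts0 c
    obtain ⟨s, e⟩ := r
    simp only [List.foldl_cons, fillParts]
    rw [ih]
    simp

theorem walkA_acc2 (cs : List Char) (mem : Nat → Bool) : ∀ (i : Nat) (p q : List String),
    walkA cs mem i (p ++ q) = p ++ walkA cs mem i q := by
  intro i
  induction hk : cs.length - i using Nat.strong_induction_on generalizing i with
  | _ k ih =>
    intro p q
    rw [walkA]; conv_rhs => rw [walkA]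
    by_cases hl : i < cs.length
    · simp only [dif_pos hl]
      by_cases hm : mem i = true
      · simp only [dif_pos hm]
        have hj := scanMem_succ_le cs.length mem i hl hm
        rw [List.append_assoc]
        exact ih _ (by omega) _ rfl p _
      · simp only [dif_neg hm]
        have hj := scanFix_succ_le cs.length mem i hl (by simpa using hm)
        rw [List.append_assoc]
        exact ih _ (by omega) _ rfl p _
    · simp [dif_neg hl]

theorem walkA_acc (cs : List Char) (mem : Nat → Bool) (i : Nat) (parts : List String) :
    walkA cs mem i parts = parts ++ walkA cs mem i [] := by
  simpa using walkA_acc2 cs mem i parts []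

theorem scanMem_eq (n : Nat) (mem : Nat → Bool) : ∀ (i j : Nat), i ≤ j → j ≤ n →
    (∀ k, i ≤ k → k < j → mem k = true) → (j = n ∨ mem j = false) → scanMem n mem i = j := by
  intro i j hij hjn hall hstop
  induction hd : j - i using Nat.strong_induction_on generalizing i with
  | _ d ih =>
    by_cases hi : i = j
    · subst hi
      rw [scanMem, dif_neg]
      rintro ⟨h1, h2⟩
      rcases hstop with h | h
      · omega
      · rw [h2] at h; simp at h
    · have hlt : i < j := by omega
      rw [scanMem, dif_pos ⟨by omega, hall i le_rfl hlt⟩]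
      exact ih (j - (i + 1)) (by omega) (i + 1) (by omega)
        (fun k hk1 hk2 => hall k (by omega) hk2) rfl

theorem scanFix_eq (n : Nat) (mem : Nat → Bool) : ∀ (i j : Nat), i ≤ j → j ≤ n →
    (∀ k, i ≤ k → k < j → mem k = false) → (j = n ∨ mem j = true) → scanFix n mem i = j := by
  intro i j hij hjn hall hstop
  induction hd : j - i using Nat.strong_induction_on generalizing i with
  | _ d ih =>
    by_cases hi : i = j
    · subst hi
      rw [scanFix, dif_neg]
      rintro ⟨h1, h2⟩
      rcases hstop with h | h
      · omega
      · rw [h2] at h; simp at h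
    · have hlt : i < j := by omega
      rw [scanFix, dif_pos ⟨by omega, hall i le_rfl hlt⟩]
      exact ih (j - (i + 1)) (by omega) (i + 1) (by omega)
        (fun k hk1 hk2 => hall k (by omega) hk2) rfl

theorem groupAux_spec : ∀ (tail : List Int) (s e : Int), (e :: tail).Pairwise (· < ·) →
    ∃ E, e ≤ E ∧ E ∈ e :: tail ∧ (∀ k, e < k → k ≤ E → k ∈ tail) ∧
      (∀ x ∈ tail, x ≤ E ∨ E + 1 < x) ∧
      groupAux s e tail = (s, E) :: groupRuns (tail.filter (fun x => decide (E + 1 ≤ x))) := by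
  intro tail
  induction tail with
  | nil =>
    intro s e _
    exact ⟨e, le_rfl, by simp, by intro k h1 h2; omega, by simp, by simp [groupAux, groupRuns]⟩
  | cons p rest ih =>
    intro s e hp
    have hep : e < p := (List.pairwise_cons.mp hp).1 p (by simp)
    have hprest : (p :: rest).Pairwise (· < ·) := (List.pairwise_cons.mp hp).2
    have hrest : ∀ x ∈ rest, p < x := (List.pairwise_cons.mp hprest).1
    by_cases hc : p = e + 1
    · obtain ⟨E, hE1, hE2, hE3, hE4, hE5⟩ := ih s p hprest
      refine ⟨E, by omega, ?_, ?_, ?_, ?_⟩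
      · rcases List.mem_cons.mp hE2 with h | h
        · simp [h]
        · simp [h]
      · intro k h1 h2
        by_cases hk : k = p
        · simp [hk]
        · have : p < k := by omega
          exact List.mem_cons_of_mem _ (hE3 k this h2)
      · intro x hx
        rcases List.mem_cons.mp hx with h | h
        · left; omega
        · exact hE4 x h
      · rw [groupAux, if_pos hc, hE5]
        congr 1
        rw [List.filter_cons]
        have : ¬ (E + 1 ≤ p) := by omega
        simp [this]
    · have hep1 : e + 1 < p := by omega
      refine ⟨e, le_rfl, by simp, by intro k h1 h2; omega, ?_, ?_⟩
      · intro x hx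
        rcases List.mem_cons.mp hx with h | h
        · right; omega
        · right; have := hrest x h; omega
      · rw [groupAux, if_neg hc]
        congr 1
        have hfilter : (p :: rest).filter (fun x => decide (e + 1 ≤ x)) = p :: rest := by
          rw [List.filter_eq_self]
          intro x hx
          rcases List.mem_cons.mp hx with h | h
          · simp [h]; omega
          · have := hrest x h; simp; omega
        rw [hfilter, groupRuns]

-- the central lemma: A's walk from cursor c joins to B's gap-fill over the runs of the
-- remaining design positions
-- join of the parts, on the List Char side
def J (l : List String) : List Char := PySem.Chars.join [] (l.map String.toList)

theorem join_nil_flatten (parts : List (List Char)) : PySem.Chars.join [] parts = parts.flatten := by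
  induction parts with
  | nil => rfl
  | cons p rest ih =>
    cases rest <;> simp_all [PySem.Chars.join, List.intercalate, List.intersperse]

theorem J_cons (a : String) (l : List String) : J (a :: l) = a.toList ++ J l := by
  simp [J, join_nil_flatten]

theorem J_append (a b : List String) : J (a ++ b) = J a ++ J b := by
  simp [J, join_nil_flatten]

theorem J_nil : J [] = [] := rfl

theorem walk_eq_fill (cs : List Char) (ps : List Int) (mem : Nat → Bool)
    (hsort : ps.Pairwise (· < ·))
    (hbd : ∀ p ∈ ps, 0 ≤ p ∧ p < (cs.length : Int))
    (hmem : ∀ i : Nat, mem i = true ↔ (i : Int) ∈ ps) :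
    ∀ (c : Nat), c ≤ cs.length →
      J (walkA cs mem c [])
        = J (fillParts cs (c : Int)
            (groupRuns (ps.filter (fun p => decide ((c : Int) ≤ p))))) := by
  intro c
  induction hk : cs.length - c using Nat.strong_induction_on generalizing c with
  | _ k ih =>
    intro hcle
    cases hpsc : ps.filter (fun p => decide ((c : Int) ≤ p)) with
    | nil =>
      have hnomem : ∀ m : Nat, c ≤ m → mem m = false := by
        intro m hm
        by_contra h
        have hmt : mem m = true := by simpa using h
        have h1 : (m : Int) ∈ ps := (hmem m).mp hmt
        have h2 : (m : Int) ∈ ps.filter (fun p => decide ((c : Int) ≤ p)) :=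
          List.mem_filter.mpr ⟨h1, by simp; exact_mod_cast hm⟩
        rw [hpsc] at h2; simp at h2
      simp only [groupRuns, fillParts]
      by_cases hceq : c = cs.length
      · rw [walkA, dif_neg (by omega)]
        subst hceq
        rw [PySem.List.slice_from_natCast]
        simp [J, List.drop_length]
      · have hlt : c < cs.length := by omega
        have hj : scanFix cs.length mem c = cs.length :=
          scanFix_eq _ _ c cs.length (by omega) le_rfl (fun m h1 _ => hnomem m h1) (Or.inl rfl)
        rw [walkA, dif_pos hlt, dif_neg (by simp [hnomem c le_rfl])]
        have hwend : walkA cs mem cs.length [] = [] := by rw [walkA]; simp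
        rw [hj, walkA_acc, hwend]
        rw [PySem.List.slice_natCast, PySem.List.slice_from_natCast]
        simp [J]
    | cons s tail =>
      have hsub : ∀ x ∈ s :: tail, x ∈ ps ∧ (c : Int) ≤ x := by
        intro x hx
        rw [← hpsc] at hx
        have h := List.mem_filter.mp hx
        exact ⟨h.1, by simpa using h.2⟩
      have hpsorted : (s :: tail).Pairwise (· < ·) := by
        rw [← hpsc]; exact hsort.filter _
      obtain ⟨E, hE1, hE2, hE3, hE4, hE5⟩ := groupAux_spec tail s s hpsorted
      have hsps := hsub s (by simp)
      have hEps := hsub E hE2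
      have hsbd := hbd s hsps.1
      have hEbd := hbd E hEps.1
      obtain ⟨sN, hsN⟩ : ∃ m : Nat, (m : Int) = s := ⟨s.toNat, Int.toNat_of_nonneg hsbd.1⟩
      obtain ⟨EN, hEN⟩ : ∃ m : Nat, (m : Int) = E := ⟨E.toNat, Int.toNat_of_nonneg hEbd.1⟩
      have htail_gt : ∀ x ∈ tail, s < x := (List.pairwise_cons.mp hpsorted).1
      have hmem_run : ∀ m : Nat, sN ≤ m → m ≤ EN → mem m = true := by
        intro m h1 h2
        apply (hmem m).mpr
        by_cases hms : (m : Int) = s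
        · rw [hms]; exact hsps.1
        · have hlt : s < (m : Int) := by omega
          have hle : (m : Int) ≤ E := by omega
          exact (hsub _ (List.mem_cons_of_mem _ (hE3 _ hlt hle))).1
      have hElt : E < (cs.length : Int) := hEbd.2
      have hEN1le : EN + 1 ≤ cs.length := by omega
      have hsN_le_EN : sN ≤ EN := by omega
      have hc_le_sN : c ≤ sN := by
        have := hsps.2; omega
      have hstop : EN + 1 = cs.length ∨ mem (EN + 1) = false := by
        by_cases h : EN + 1 = cs.length
        · exact Or.inl h
        · right
          by_contra hcon
          have hmt : mem (EN + 1) = true := by simpa using hcon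
          have h1 : ((EN + 1 : Nat) : Int) ∈ ps := (hmem _).mp hmt
          have h2 : ((EN + 1 : Nat) : Int) ∈ ps.filter (fun p => decide ((c : Int) ≤ p)) :=
            List.mem_filter.mpr ⟨h1, by simp; push_cast; omega⟩
          rw [hpsc] at h2
          rcases List.mem_cons.mp h2 with h3 | h3
          · push_cast at h3; omega
          · rcases hE4 _ h3 with h4 | h4 <;> (push_cast at h4 ⊢; omega)
      have hscan : scanMem cs.length mem sN = EN + 1 :=
        scanMem_eq _ _ sN (EN + 1) (by omega) hEN1le
          (fun m h1 h2 => hmem_run m h1 (by omega)) hstop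
      have hrest : tail.filter (fun x => decide (E + 1 ≤ x))
          = ps.filter (fun p => decide (((EN + 1 : Nat) : Int) ≤ p)) := by
        have h1 : tail.filter (fun x => decide (E + 1 ≤ x))
            = (s :: tail).filter (fun x => decide (E + 1 ≤ x)) := by
          rw [List.filter_cons]
          have hns : ¬ (E + 1 ≤ s) := by omega
          simp [hns]
        rw [h1, ← hpsc, List.filter_filter]
        apply List.filter_congr
        intro x hx
        by_cases h : E + 1 ≤ x
        · have h2 : (c : Int) ≤ x := by omega
          simp [h, h2]
          omega
        · simp [h]
          omega
      have ihE := ih (cs.length - (EN + 1)) (by omega) (EN + 1) rfl (by omega)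
      rw [← hrest] at ihE
      have hruns : groupRuns (s :: tail)
          = (s, E) :: groupRuns (tail.filter (fun x => decide (E + 1 ≤ x))) := by
        simp only [groupRuns]; exact hE5
      rw [hruns]
      simp only [fillParts]
      have hEcast : ((EN + 1 : Nat) : Int) - 1 = (EN : Int) := by push_cast; omega
      have hcast3 : ((EN + 1 : Nat) : Int) = (EN : Int) + 1 := by push_cast; ring_nf
      rw [← hEN] at ihE
      rw [hcast3] at ihE
      by_cases hceqs : c = sN
      · subst hceqs
        rw [walkA, dif_pos (by omega), dif_pos (hmem_run c le_rfl hsN_le_EN)]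
        rw [hscan, walkA_acc]
        rw [J_append, J_append, J_cons, J_cons, ihE]
        rw [← hsN, ← hEN, hEcast]
        rw [PySem.List.slice_natCast]
        simp [J_cons, J_nil]
      · have hclts : c < sN := by omega
        have hmem_before : ∀ m : Nat, c ≤ m → (m : Int) < s → mem m = false := by
          intro m h1 h2
          by_contra hcon
          have hmt : mem m = true := by simpa using hcon
          have hm1 : (m : Int) ∈ ps := (hmem m).mp hmt
          have hm2 : (m : Int) ∈ ps.filter (fun p => decide ((c : Int) ≤ p)) :=
            List.mem_filter.mpr ⟨hm1, by simp; exact_mod_cast h1⟩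
          rw [hpsc] at hm2
          rcases List.mem_cons.mp hm2 with h3 | h3
          · omega
          · have := htail_gt _ h3; omega
        rw [walkA, dif_pos (by omega), dif_neg (by simp [hmem_before c le_rfl (by omega)])]
        have hscanF : scanFix cs.length mem c = sN :=
          scanFix_eq _ _ c sN (by omega) (by omega)
            (fun m h1 h2 => hmem_before m h1 (by omega))
            (Or.inr (hmem_run sN le_rfl hsN_le_EN))
        rw [hscanF, walkA_acc]
        rw [walkA, dif_pos (by omega), dif_pos (hmem_run sN le_rfl hsN_le_EN), hscan, walkA_acc]
        rw [J_append, J_append, J_append, J_cons, J_cons, ihE]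
        rw [← hsN, ← hEN, hEcast]
        rw [PySem.List.slice_natCast]
        simp [J_cons, J_nil]

-- B's port, rewritten through the recursion views of its two loops
theorem alt_eq (sequence : String) (design_residues : List Int) :
    interleave_design_ranges_in_sequence_alt sequence design_residues
      = PySem.Str.join "" (fillParts sequence.toList 0
          (groupRuns (PySem.List.sorted
            (PySem.Set.ofList ((design_residues.filter
              (fun pos => decide (1 ≤ pos ∧ pos ≤ (sequence.toList.length : Int)))).map
                (fun pos => pos - 1))) (fun x => x) false))) := by
  simp only [interleave_design_ranges_in_sequence_alt]
  cases hps : PySem.List.sorted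
      (PySem.Set.ofList ((design_residues.filter
        (fun pos => decide (1 ≤ pos ∧ pos ≤ (sequence.toList.length : Int)))).map
          (fun pos => pos - 1))) (fun x => x) false with
  | nil => simp [groupRuns, fillParts]
  | cons p rest =>
    simp only [groupRuns]
    rw [groupFold_eq rest [] p p, List.nil_append, fillFold_eq sequence.toList (groupAux p p rest) [] 0,
      List.nil_append]

-- ===== VERDICT (by name: the statement is the Claim_ definition above) =====
set_option maxHeartbeats 1000000 in
theorem interleave_design_ranges_in_sequence_spec : Claim_equal_interleave_design_ranges_in_sequence := by
  unfold Claim_equal_interleave_design_ranges_in_sequence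
  intro sequence design_residues _
  unfold Spec_interleave_design_ranges_in_sequence
  rw [alt_eq]
  unfold interleave_design_ranges_in_sequence
  by_cases hdr : design_residues = []
  · subst hdr
    rw [if_pos rfl]
    refine String.toList_inj.mp ?_
    rw [PySem.Str.toList_join]
    have hnil : PySem.List.sorted ([] : List Int) (fun x => x) false = [] :=
      (PySem.List.sorted_eq_nil_iff _ _ _).mpr rfl
    simp [groupRuns, fillParts, hnil,
      PySem.List.slice_zero_start, PySem.List.slice_none_none]
  · by_cases hset : PySem.Set.ofList ((design_residues.filter
        (fun pos => decide (1 ≤ pos ∧ pos ≤ (sequence.toList.length : Int)))).map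
          (fun pos => pos - 1)) = []
    · simp only [if_neg hdr, hset]
      refine String.toList_inj.mp ?_
      rw [PySem.Str.toList_join]
      have hnil : PySem.List.sorted ([] : List Int) (fun x => x) false = [] :=
        (PySem.List.sorted_eq_nil_iff _ _ _).mpr rfl
      simp [groupRuns, fillParts, hnil,
        PySem.List.slice_zero_start, PySem.List.slice_none_none]
    · simp only [if_neg hdr, if_neg hset]
      refine String.toList_inj.mp ?_
      rw [PySem.Str.toList_join, PySem.Str.toList_join]
      have hds := PySem.Set.nodup_ofList ((design_residues.filter
        (fun pos => decide (1 ≤ pos ∧ pos ≤ (sequence.toList.length : Int)))).map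
          (fun pos => pos - 1))
      set ds := PySem.Set.ofList ((design_residues.filter
        (fun pos => decide (1 ≤ pos ∧ pos ≤ (sequence.toList.length : Int)))).map
          (fun pos => pos - 1)) with hdsdef
      set ps := PySem.List.sorted ds (fun x => x) false with hpsdef
      have hperm : ps.Perm ds := PySem.List.sorted_perm ds (fun x => x) false
      have hle : ps.Pairwise (fun a b => a ≤ b) := PySem.List.sorted_pairwise ds (fun x => x)
      have hnd : ps.Nodup := hperm.nodup_iff.mpr hds
      have hsort : ps.Pairwise (· < ·) :=
        (hle.and hnd).imp (fun h => lt_of_le_of_ne h.1 h.2)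
      have hbd : ∀ p ∈ ps, 0 ≤ p ∧ p < (sequence.toList.length : Int) := by
        intro p hp
        have h1 : p ∈ ds := hperm.mem_iff.mp hp
        rw [hdsdef, PySem.Set.mem_ofList] at h1
        simp only [List.mem_map, List.mem_filter, decide_eq_true_eq] at h1
        obtain ⟨pos, ⟨hm, hcond⟩, rfl⟩ := h1
        omega
      have hmem : ∀ i : Nat, PySem.Set.contains ds (i : Int) = true ↔ (i : Int) ∈ ps := by
        intro i
        exact (PySem.Set.contains_iff ds (i : Int)).trans hperm.mem_iff.symm
      have main := walk_eq_fill sequence.toList ps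
        (fun i => PySem.Set.contains ds (i : Int)) hsort hbd hmem 0 (Nat.zero_le _)
      have hfil : ps.filter (fun p => decide (((0 : Nat) : Int) ≤ p)) = ps :=
        List.filter_eq_self.mpr (fun a ha => by simpa using (hbd a ha).1)
      rw [hfil] at main
      simp only [Nat.cast_zero] at main
      simpa [J] using main
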